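-- pv_equiv track=rewrite | github.com/Resmakor/LeetCode | 2042-check-if-numbers-are-ascending-in-a-sentence/2042-check-if-numbers-are-ascending-in-a-sentence.py | areNumbersAscending
-- ===== SOURCE A (Python) =====
-- def areNumbersAscending(s):
--     """
--     :type s: str
--     :rtype: bool
--     """
--     numbers = []
--     for word in s.split():
--         current_number = ""
--         for letter in word:
--             if letter < '0' or letter > '9':
--                 current_number = ""
--                 break
--             else:
--                 current_number += letter
--         if current_number != "":
--             numbers.append(current_number)
--     numbers = [int(element) for element in numbers]
--     for i in range(len(numbers) - 1):
--         if numbers[i] >= numbers[i + 1]: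
--             return False
--     return True
-- ===== SOURCE B (Python) =====
-- def areNumbersAscending(s):
--     nums = [int(w) for w in s.split() if all('0' <= c <= '9' for c in w)]
--     return nums == sorted(set(nums))
-- ===== Notes on version B (the rewrite author's own statement) =====
-- stated objective: alternative
-- what changed: Replaces A's explicit neighbour-comparison index loop with an order-theoretic check: collect the numeric-word values once and test nums == sorted(set(nums)), i.e. the sequence is strictly ascending iff it equals the sorted list of its distinct values.
import Mathlib
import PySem

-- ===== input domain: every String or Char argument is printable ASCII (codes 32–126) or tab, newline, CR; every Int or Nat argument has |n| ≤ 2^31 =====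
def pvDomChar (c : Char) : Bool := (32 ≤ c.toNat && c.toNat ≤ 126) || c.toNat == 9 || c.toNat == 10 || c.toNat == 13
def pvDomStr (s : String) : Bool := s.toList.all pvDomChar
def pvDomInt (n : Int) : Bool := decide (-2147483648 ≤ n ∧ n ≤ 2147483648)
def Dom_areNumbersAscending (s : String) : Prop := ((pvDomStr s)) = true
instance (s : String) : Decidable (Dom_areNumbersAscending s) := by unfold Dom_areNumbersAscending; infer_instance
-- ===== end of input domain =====

-- B replaces A's explicit neighbour-comparison loop by the order-theoretic test
-- nums == sorted(set(nums)): a sequence is strictly ascending iff it equals the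
-- sorted list of its distinct values.

-- ===== PORT A =====
-- inner loop: current_number = ""; for letter in word: non-digit → "" and break, else append
def pvInnerA : List Char → List Char → List Char
  | [], acc => acc
  | c :: rest, acc => if c < '0' ∨ c > '9' then [] else pvInnerA rest (acc ++ [c])

-- for i in range(len(numbers)-1): if numbers[i] >= numbers[i+1]: return False
def pvAscLoopA : List Int → Bool
  | a :: b :: rest => if a ≥ b then false else pvAscLoopA (b :: rest)
  | _ => true

def areNumbersAscending (s : String) : Bool :=
  let numbers : List (List Char) :=
    (PySem.Str.split₀ s).foldl (fun acc w =>
      let cur := pvInnerA w.toList []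
      if cur ≠ [] then acc ++ [cur] else acc) []
  -- int(element): element is a nonempty digit string here, so int() never raises; getD 0 is unreachable
  let nums : List Int := numbers.map (fun e => (PySem.Int.ofChars? e).getD 0)
  pvAscLoopA nums

-- ===== PORT B =====
def areNumbersAscending_alt (s : String) : Bool :=
  let nums : List Int :=
    ((PySem.Str.split₀ s).filter (fun w =>
        w.toList.all (fun c => decide ('0' ≤ c) && decide (c ≤ '9')))).map
      (fun w => (PySem.Int.ofStr? w).getD 0)   -- int(w): digit-only word, never raises
  decide (nums = PySem.List.sorted (PySem.Set.ofList nums) (fun x => x) false)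

-- ===== PRECONDITION & SPEC =====
def Spec_areNumbersAscending (s : String) (out : Bool) : Prop := out = areNumbersAscending_alt s
instance (s : String) (out : Bool) : Decidable (Spec_areNumbersAscending s out) := by unfold Spec_areNumbersAscending; infer_instance

-- ===== CLAIM =====
def Claim_equal_areNumbersAscending : Prop := ∀ (s : String), Dom_areNumbersAscending s → Spec_areNumbersAscending s (areNumbersAscending s)

-- ===== LEMMAS AND PROOFS =====

def pvIsDig (c : Char) : Bool := decide ('0' ≤ c) && decide (c ≤ '9')

lemma pvInnerA_spec (cs acc : List Char) :
    pvInnerA cs acc = if cs.all pvIsDig then acc ++ cs else [] := by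
  induction cs generalizing acc with
  | nil => simp [pvInnerA]
  | cons c rest ih =>
    simp only [pvInnerA, List.all_cons, ih, pvIsDig]
    by_cases h0 : '0' ≤ c
    · by_cases h9 : c ≤ '9'
      · simp [not_lt.mpr h0, not_lt.mpr h9, h0, h9]
      · simp [lt_of_not_ge h9, h9]
    · simp [lt_of_not_ge h0, h0]

-- fold that appends the numeric words = filter
lemma pvCollect_eq (ws : List String) (acc : List (List Char)) :
    ws.foldl (fun acc w =>
      let cur := pvInnerA w.toList []
      if cur ≠ [] then acc ++ [cur] else acc) acc
    = acc ++ (ws.filter (fun w => pvInnerA w.toList [] ≠ [])).map (fun w => pvInnerA w.toList []) := by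
  induction ws generalizing acc with
  | nil => simp
  | cons w rest ih =>
    simp only [List.foldl_cons]
    rw [ih, List.filter_cons]
    by_cases h : pvInnerA w.toList [] ≠ [] <;> simp [h]

-- A's scan returns true exactly on pairwise strictly increasing lists
lemma pvAscLoopA_eq_pairwise (xs : List Int) :
    pvAscLoopA xs = decide (xs.Pairwise (· < ·)) := by
  induction xs with
  | nil => simp [pvAscLoopA]
  | cons a rest ih =>
    cases rest with
    | nil => simp [pvAscLoopA]
    | cons b t =>
      by_cases h : a ≥ b
      · have : ¬ (a :: b :: t).Pairwise (· < ·) := by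
          intro hp
          exact absurd (List.rel_of_pairwise_cons hp (by simp)) (not_lt.mpr h)
        simp [pvAscLoopA, h, this]
      · have hab : a < b := lt_of_not_ge h
        simp only [pvAscLoopA, ge_iff_le, not_le.mpr hab, ih]
        by_cases hp : (b :: t).Pairwise (· < ·)
        · have : (a :: b :: t).Pairwise (· < ·) := by
            refine List.Pairwise.cons ?_ hp
            intro x hx
            rcases List.mem_cons.mp hx with rfl | hx
            · exact hab
            · exact lt_trans hab (List.rel_of_pairwise_cons hp hx)
          simp [hp, this]
        · have : ¬ (a :: b :: t).Pairwise (· < ·) := fun hc => hp hc.of_cons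
          simp [hp, this]

-- B's test nums == sorted(set(nums)) also characterises strict ascent
lemma pvSortedSet_iff (xs : List Int) :
    (xs = PySem.List.sorted (PySem.Set.ofList xs) (fun x => x) false) ↔ xs.Pairwise (· < ·) := by
  constructor
  · intro h
    rw [h]
    exact PySem.List.sorted_ofList_pairwise_lt xs
  · intro hp
    have hnd : xs.Nodup := hp.nodup
    have hself : PySem.Set.ofList xs = xs := PySem.Set.ofList_eq_self_of_nodup xs hnd
    rw [hself]
    exact (PySem.List.sorted_eq_of_perm_of_pairwise_lt xs xs (fun x => x) (List.Perm.refl xs) hp).symm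

-- every piece of s.split() is nonempty
lemma pvSplitGo_ne_nil (cs : List Char) : ∀ (cur : List Char) (acc : List (List Char)),
    (∀ w ∈ acc, w ≠ []) → ∀ w ∈ PySem.Chars.split₀.go cs cur acc, w ≠ [] := by
  induction cs with
  | nil =>
    intro cur acc hacc w hw
    simp only [PySem.Chars.split₀.go] at hw
    by_cases hc : cur.isEmpty
    · simp [hc] at hw; exact hacc w hw
    · simp [hc] at hw
      rcases hw with h | rfl
      · exact hacc w h
      · simpa [List.isEmpty_iff] using hc
  | cons c rest ih =>
    intro cur acc hacc w hw
    simp only [PySem.Chars.split₀.go] at hw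
    by_cases hs : PySem.Chars.isspace c
    · by_cases hc : cur.isEmpty
      · simp [hs, hc] at hw
        exact ih [] acc hacc w hw
      · simp [hs, hc] at hw
        refine ih [] (cur.reverse :: acc) ?_ w hw
        intro x hx
        simp only [List.mem_cons] at hx
        rcases hx with rfl | hx
        · simpa [List.isEmpty_iff] using hc
        · exact hacc x hx
    · simp [hs] at hw
      exact ih (c :: cur) acc hacc w hw

lemma pvSplit_ne_nil (s : String) : ∀ w ∈ PySem.Str.split₀ s, w.toList ≠ [] := by
  intro w hw
  simp only [PySem.Str.split₀, List.mem_map] at hw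
  obtain ⟨cs, hcs, rfl⟩ := hw
  have := pvSplitGo_ne_nil s.toList [] [] (by simp) cs hcs
  simpa using this

-- on nonempty words, A's numeric-word list equals B's
lemma pvNums_eq (ws : List String) (hne : ∀ w ∈ ws, w.toList ≠ []) :
    ((ws.filter (fun w => pvInnerA w.toList [] ≠ [])).map (fun w => pvInnerA w.toList [])).map
        (fun e => (PySem.Int.ofChars? e).getD 0)
    = (ws.filter (fun w =>
        w.toList.all (fun c => decide ('0' ≤ c) && decide (c ≤ '9')))).map
      (fun w => (PySem.Int.ofStr? w).getD 0) := by
  induction ws with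
  | nil => simp
  | cons w rest ih =>
    have hw : w.toList ≠ [] := hne w (by simp)
    have ihr := ih (fun x hx => hne x (by simp [hx]))
    have e : (fun c => decide ('0' ≤ c) && decide (c ≤ '9')) = pvIsDig := rfl
    rw [e] at ihr ⊢
    rw [List.filter_cons, List.filter_cons]
    by_cases hall : w.toList.all pvIsDig
    · have h1 : pvInnerA w.toList [] = w.toList := by simp [pvInnerA_spec, hall]
      have h2 : (PySem.Int.ofChars? w.toList).getD 0 = (PySem.Int.ofStr? w).getD 0 := by
        rw [← PySem.Int.ofStr?_ofList w.toList, String.ofList_toList]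
      simp only [hall, h1, hw, ne_eq, not_false_eq_true, decide_true, if_true, List.map_cons, h2]
      rw [List.cons_inj_right]
      simpa using ihr
    · have h1 : pvInnerA w.toList [] = [] := by
        rw [pvInnerA_spec]
        simp only [List.all_eq_true] at hall
        simp [hall]
      simp only [h1, ne_eq, not_true_eq_false, decide_false, Bool.false_eq_true, if_false, hall]
      simpa using ihr

-- ===== VERDICT =====
theorem areNumbersAscending_spec : Claim_equal_areNumbersAscending := by
  intro s _
  unfold Spec_areNumbersAscending
  simp only [areNumbersAscending, areNumbersAscending_alt]
  rw [pvCollect_eq, List.nil_append, pvNums_eq (PySem.Str.split₀ s) (pvSplit_ne_nil s),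
    pvAscLoopA_eq_pairwise]
  simp only [decide_eq_decide]
  exact (pvSortedSet_iff _).symm
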